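-- pv_equiv track=rewrite | github.com/nurmaton/DS-A_KAUST | Homework 4/Problem 4/find_delete_heap_size.py | Find_and_Delete_Largest
-- ===== SOURCE A (Python) =====
-- def Min_Heapify(A, i, heap_size):
--     """Helper function to ensure the min-heap property is maintained/See Part 1"""
--
--     left = 2 * i + 1
--     right = 2 * i + 2
--     smallest = i
--
--     if left < heap_size and A[left] < A[smallest]:
--         smallest = left
--     if right < heap_size and A[right] < A[smallest]:
--         smallest = right
--
--     if smallest != i:
--         A[i], A[smallest] = A[smallest], A[i]
--         Min_Heapify(A, smallest, heap_size)
--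
-- def Find_and_Delete_Largest(A):
--     """//Finds and removes the largest element in a min-heap. After removing the largest element, the function ensures the min-heap property is restored.
--        //Inputs: A - Array representing a min-heap.
--        //Output: Modified min-heap array after deleting the largest element."""
--
--     n = len(A)
--     if n == 0:
--         return None  # Returning None if the heap is empty
--
--     # Identifying the range of leaf nodes
--     first_leaf_index = n // 2  # First leaf node is the child of the last parent node
--
--     # Finding the largest element among the leaf nodes
--     largest_index = first_leaf_index
--     for i in range(first_leaf_index, n):
--         if A[i] > A[largest_index]:
--             largest_index = i
--
--     # Swapping and removing the largest element
--     A[largest_index], A[-1] = A[-1], A[largest_index]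
--     largest_element = A.pop()
--
--     # Restoring the min-heap property if necessary
--     if largest_index < len(A):  # Checking if the swapped element was not already the last one
--         Min_Heapify(A, largest_index, len(A))
--
--     return largest_element
-- ===== SOURCE B (Python) =====
-- def Find_and_Delete_Largest(A):
--     # Same in-place effect as the original (swap leftmost-max leaf with last, pop,
--     # sift down), but the max leaf is found via slice+max+index and the heap
--     # restoration is an inline iterative sift-down instead of a recursive helper.
--     n = len(A)
--     if n == 0:
--         return None
--     leaves = A[n // 2:]
--     largest = max(leaves)
--     li = n // 2 + leaves.index(largest)
--     A[li] = A[n - 1]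
--     A.pop()
--     m = len(A)
--     i = li
--     while True:
--         left, right, smallest = 2 * i + 1, 2 * i + 2, i
--         if left < m and A[left] < A[smallest]:
--             smallest = left
--         if right < m and A[right] < A[smallest]:
--             smallest = right
--         if smallest == i:
--             break
--         A[i], A[smallest] = A[smallest], A[i]
--         i = smallest
--     return largest
-- ===== Notes on version B (the rewrite author's own statement) =====
-- stated objective: simpler
-- what changed: B replaces A's explicit argmax-index loop over the leaf range with slice+max+index on the leaf suffix, and replaces the recursive Min_Heapify helper with an inline iterative sift-down loop.
import Mathlib
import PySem

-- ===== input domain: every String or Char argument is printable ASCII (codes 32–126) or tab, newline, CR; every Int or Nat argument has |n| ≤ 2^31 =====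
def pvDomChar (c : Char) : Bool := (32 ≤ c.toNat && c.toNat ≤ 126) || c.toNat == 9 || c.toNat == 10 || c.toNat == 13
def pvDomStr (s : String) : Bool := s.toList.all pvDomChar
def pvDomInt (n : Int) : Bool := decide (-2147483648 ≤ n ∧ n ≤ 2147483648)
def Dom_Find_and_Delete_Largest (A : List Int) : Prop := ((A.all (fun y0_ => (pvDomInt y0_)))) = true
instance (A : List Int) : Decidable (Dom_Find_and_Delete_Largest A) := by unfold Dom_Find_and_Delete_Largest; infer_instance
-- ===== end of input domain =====

-- B finds the max leaf with slice+max+index and restores the heap with an inline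
-- iterative sift-down (objective: simpler). Both Pythons mutate A in place
-- identically; the equivalence proved here is about the RETURN value only, so the
-- in-place mutation/heapify steps (which do not affect the returned value) are not
-- modeled in either port.

-- ===== PORT A =====
-- A scans the leaf indices range(n//2, n) keeping the index of the (leftmost)
-- largest leaf; after the swap, A.pop() returns the ORIGINAL A[largest_index],
-- which is the returned value.  The subsequent in-place Min_Heapify only
-- mutates A and never changes the return value, so it is not modeled.
def Find_and_Delete_Largest (A : List Int) : Option Int :=
  let n := A.length
  if n = 0 then none
  else
    let first_leaf_index := n / 2
    let largest_index :=
      (List.range' first_leaf_index (n - first_leaf_index)).foldl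
        (fun li i => if A.getD i 0 > A.getD li 0 then i else li) first_leaf_index
    some (A.getD largest_index 0)

-- ===== PORT B =====
-- leaves = A[n//2:] (nonnegative start: the slice is List.drop, exact here);
-- largest = max(leaves) via PySem.List.max? (none = the empty-sequence ValueError,
-- unreachable since n ≥ 1).  The in-place writes/pop/sift-down of Source B only
-- mutate A and do not affect the returned value, so they are not modeled.
def Find_and_Delete_Largest_alt (A : List Int) : Option Int :=
  let n := A.length
  if n = 0 then none
  else
    let leaves := A.drop (n / 2)
    PySem.List.max? leaves (fun y => y)

-- ===== PRECONDITION & SPEC =====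
def Spec_Find_and_Delete_Largest (A : List Int) (out : Option Int) : Prop := out = Find_and_Delete_Largest_alt A
instance (A : List Int) (out : Option Int) : Decidable (Spec_Find_and_Delete_Largest A out) := by unfold Spec_Find_and_Delete_Largest; infer_instance

-- ===== CLAIM (what is proved, stated in full; the proofs are below) =====
def Claim_equal_Find_and_Delete_Largest : Prop := ∀ (A : List Int), Dom_Find_and_Delete_Largest A → Spec_Find_and_Delete_Largest A (Find_and_Delete_Largest A)

-- ===== LEMMAS AND PROOFS =====

-- value of A's argmax-index fold = running max of the corresponding values
lemma argmax_foldl_val (A : List Int) :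
    ∀ (m k acc : Nat),
      A.getD ((List.range' k m).foldl
          (fun li i => if A.getD i 0 > A.getD li 0 then i else li) acc) 0
        = ((List.range' k m).map (fun i => A.getD i 0)).foldl max (A.getD acc 0) := by
  intro m
  induction m with
  | zero => intro k acc; simp
  | succ m ih =>
      intro k acc
      simp only [List.range'_succ, List.foldl_cons, List.map_cons]
      rw [ih]
      congr 1
      by_cases h : A.getD acc 0 < A.getD k 0
      · rw [if_pos h, max_eq_right h.le]
      · rw [if_neg h, max_eq_left (not_lt.mp h)]

-- values at the index range [k, A.length) are exactly the dropped suffix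
lemma map_getD_range' (A : List Int) :
    ∀ (m k : Nat), k + m = A.length →
      (List.range' k m).map (fun i => A.getD i 0) = A.drop k := by
  intro m
  induction m with
  | zero =>
      intro k hk
      have hk' : A.length ≤ k := by omega
      simp [List.drop_eq_nil_of_le hk']
  | succ m ih =>
      intro k hk
      have hk' : k < A.length := by omega
      rw [List.range'_succ, List.map_cons, ih (k + 1) (by omega),
          List.drop_eq_getElem_cons hk']
      congr 1
      simp [List.getD_eq_getElem?_getD, List.getElem?_eq_getElem hk']

-- ===== VERDICT (by name: the statement is the Claim_ definition above) =====
theorem Find_and_Delete_Largest_spec : Claim_equal_Find_and_Delete_Largest := by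
  unfold Claim_equal_Find_and_Delete_Largest
  intro A _
  unfold Spec_Find_and_Delete_Largest Find_and_Delete_Largest Find_and_Delete_Largest_alt
  by_cases hn : A.length = 0
  · simp [hn]
  · simp only [hn]
    have hf2 : A.length / 2 < A.length := Nat.div_lt_self (by omega) (by omega)
    have hdrop : A.drop (A.length / 2) =
        A.getD (A.length / 2) 0 :: A.drop (A.length / 2 + 1) := by
      rw [List.drop_eq_getElem_cons hf2]
      congr 1
      simp [List.getD_eq_getElem?_getD, List.getElem?_eq_getElem hf2]
    rw [argmax_foldl_val A, hdrop, PySem.List.max?_id_cons]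
    congr 1
    have hr : List.range' (A.length / 2) (A.length - A.length / 2)
        = (A.length / 2) :: List.range' (A.length / 2 + 1) (A.length - (A.length / 2 + 1)) := by
      have : A.length - A.length / 2 = (A.length - (A.length / 2 + 1)) + 1 := by omega
      rw [this, List.range'_succ]
    rw [hr, List.map_cons, List.foldl_cons, max_self,
        map_getD_range' A _ _ (by omega)]
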